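-- pv_equiv track=rewrite | github.com/TenkiSoft/proyWeb | content/utils/widgets_maps.py | get_icons
-- ===== SOURCE A (Python) =====
-- def get_icons(icon_area):
--     icon_areas = {
--         "fa-address-card":["home_section_a2"]
--     }
--     result = None
--     for icon_item,v in icon_areas.items():
--         if icon_area in v:
--             result = icon_item
--     return result
-- ===== SOURCE B (Python) =====
-- def get_icons(icon_area):
--     icon_to = {"home_section_a2": "fa-address-card"}
--     return icon_to.get(icon_area)
-- ===== Notes on version B (the rewrite author's own statement) =====
-- stated objective: idiomatic
-- what changed: Replaces the loop over the icon->areas dict with a literal inverse area->icon dict and a single .get lookup.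
import Mathlib
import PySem

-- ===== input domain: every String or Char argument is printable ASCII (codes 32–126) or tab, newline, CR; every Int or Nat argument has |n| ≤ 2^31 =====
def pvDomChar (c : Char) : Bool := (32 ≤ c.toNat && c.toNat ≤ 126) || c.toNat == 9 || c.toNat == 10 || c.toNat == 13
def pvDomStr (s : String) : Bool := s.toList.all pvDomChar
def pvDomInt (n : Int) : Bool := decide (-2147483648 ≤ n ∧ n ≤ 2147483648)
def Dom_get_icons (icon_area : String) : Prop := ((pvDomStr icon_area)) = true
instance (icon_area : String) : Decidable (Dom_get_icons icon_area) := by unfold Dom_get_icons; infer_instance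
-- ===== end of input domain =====

-- B replaces the search loop with a one-entry inverse dict lookup (idiomatic).


-- ===== PORT A =====
-- literal transliteration of A: fold over the dict's items, overwriting result on a match
def get_icons (icon_area : String) : Option String :=
  let icon_areas : PySem.Dict String (List String) :=
    PySem.Dict.ofList [("fa-address-card", ["home_section_a2"])]
  icon_areas.items.foldl (fun result p => if icon_area ∈ p.2 then some p.1 else result) none

-- ===== PORT B =====
-- B: direct lookup in the literal inverse map
def get_icons_alt (icon_area : String) : Option String :=
  let icon_to : PySem.Dict String String := PySem.Dict.ofList [("home_section_a2", "fa-address-card")]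
  icon_to.get? icon_area

-- ===== PRECONDITION & SPEC =====
def Spec_get_icons (icon_area : String) (out : Option String) : Prop := out = get_icons_alt icon_area
instance (icon_area : String) (out : Option String) : Decidable (Spec_get_icons icon_area out) := by unfold Spec_get_icons; infer_instance

-- ===== CLAIM (what is proved, stated in full; the proofs are below) =====
def Claim_equal_get_icons : Prop := ∀ (icon_area : String), Dom_get_icons icon_area → Spec_get_icons icon_area (get_icons icon_area)

-- ===== LEMMAS AND PROOFS =====

-- ===== VERDICT (by name: the statement is the Claim_ definition above) =====
theorem get_icons_spec : Claim_equal_get_icons := by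
  intro icon_area _
  unfold Spec_get_icons get_icons get_icons_alt
  by_cases h : icon_area = "home_section_a2"
  · simp [h, PySem.Dict.ofList, PySem.Dict.get?, PySem.Dict.update, PySem.Dict.empty,
      PySem.Dict.insert, PySem.Dict.contains, List.foldl]
  · simp [h, PySem.Dict.ofList, PySem.Dict.get?, PySem.Dict.update, PySem.Dict.empty,
      PySem.Dict.insert, PySem.Dict.contains, List.foldl, List.find?, Ne.symm h]
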